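-- pv_equiv track=rewrite | github.com/pcody/Study_Algorithm | Python/0804_빙산_boj2573.py | bfs
-- ===== SOURCE A (Python) =====
-- def bfs(N, M, arr):
--     vecx, vecy = [-1, 0, 1, 0], [0, 1, 0, -1]
--
--     # 0이 된 빙산이 있는지 확인할 변수
--     flag = 0
--     # 중간에 녹여서 0을 만들면 BFS를 돌면서 체크되므로 감소시킬 것들은 리스트에 담는다
--     zArr = []
--
--     # 바다(0)에 접한 빙산의 좌표와 녹는 수치를 저장한다
--     for j in range(N):
--         for i in range(M):
--             if arr[j][i] > 0:
--                 zNum = 0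
--                 for k in range(4):
--                     ni, nj = i + vecx[k], j + vecy[k]
--                     if 0 <= ni < M and 0 <= nj < N:
--                         if arr[nj][ni] == 0:
--                             zNum += 1
--                 zArr.append((i, j, zNum))
--
--     # 빙산을 녹인다
--     for i, j, zNum in zArr:
--         # 0 아래로는 떨어지지 않는 한줄 코드
--         arr[j][i] = max(0, arr[j][i] - zNum)
--         # 다 녹아서 사라졌으면 flag 1로 만들어줌
--         if arr[j][i] == 0:
--             flag = 1
--
--     # flag리턴
--     return flag
-- ===== SOURCE B (Python) =====
-- def bfs(N, M, arr):
--     # Scatter instead of gather: every sea cell pushes +1 melt onto each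
--     # in-bounds iceberg neighbour in a delta grid; a second pass applies the
--     # deltas.  (Mutates arr in place like the original.)
--     delta = [[0] * M for _ in range(N)]
--     for j in range(N):
--         for i in range(M):
--             if arr[j][i] == 0:
--                 for nj, ni in ((j - 1, i), (j + 1, i), (j, i - 1), (j, i + 1)):
--                     if 0 <= nj < N and 0 <= ni < M and arr[nj][ni] > 0:
--                         delta[nj][ni] += 1
--     flag = 0
--     for j in range(N):
--         for i in range(M):
--             if arr[j][i] > 0:
--                 arr[j][i] = max(0, arr[j][i] - delta[j][i])
--                 if arr[j][i] == 0:
--                     flag = 1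
--     return flag
-- ===== Notes on version B (the rewrite author's own statement) =====
-- stated objective: alternative
-- what changed: Inverts the data flow from gather to scatter: instead of each iceberg cell scanning its four neighbours via direction vectors and queueing (cell, melt-count) tuples to replay later, B builds a separate delta grid in which every SEA cell pushes +1 onto each in-bounds iceberg neighbour, then a second pass subtracts the delta grid from the icebergs and flags zeros; the in-place mutation of arr is identical.
import Mathlib
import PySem

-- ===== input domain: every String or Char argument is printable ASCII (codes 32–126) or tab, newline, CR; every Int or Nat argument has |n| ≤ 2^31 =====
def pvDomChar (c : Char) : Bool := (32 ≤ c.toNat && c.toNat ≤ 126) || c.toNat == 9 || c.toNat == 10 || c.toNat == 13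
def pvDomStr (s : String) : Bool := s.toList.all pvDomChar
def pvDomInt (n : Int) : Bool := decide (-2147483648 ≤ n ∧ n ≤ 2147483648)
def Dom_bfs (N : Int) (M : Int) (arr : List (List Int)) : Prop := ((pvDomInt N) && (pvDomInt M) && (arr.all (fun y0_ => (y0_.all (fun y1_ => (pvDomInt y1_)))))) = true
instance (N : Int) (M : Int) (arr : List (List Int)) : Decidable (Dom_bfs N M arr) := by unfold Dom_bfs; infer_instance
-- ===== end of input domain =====

-- B inverts the data flow from gather to scatter: every SEA cell pushes +1 onto each in-bounds
-- iceberg neighbour in a separate delta grid, and a second pass subtracts the delta grid and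
-- flags zeros; A instead has each iceberg gather its sea-neighbour count into a pending list
-- that a replay loop applies.  Both Pythons mutate arr in place identically; the theorem below
-- is about the return value.

-- shared indexing helpers: arr[j][i] read and write (in-bounds under Pre_, where Python does not raise)
def cellD (a : List (List Int)) (j i : Int) : Int :=
  PySem.List.pyGetD (PySem.List.pyGetD a j []) i 0

def setCell (a : List (List Int)) (j i : Int) (v : Int) : List (List Int) :=
  a.set j.toNat ((a.getD j.toNat []).set i.toNat v)

-- ===== PORT A =====
-- the k-loop over the direction vectors computing zNum for cell (j, i)
def zNumA (N M : Int) (arr : List (List Int)) (j i : Int) : Int :=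
  let vecx : List Int := [-1, 0, 1, 0]
  let vecy : List Int := [0, 1, 0, -1]
  (PySem.List.pyRange 0 4).foldl (fun z k =>
    let ni := i + PySem.List.pyGetD vecx k 0
    let nj := j + PySem.List.pyGetD vecy k 0
    if 0 ≤ ni ∧ ni < M ∧ 0 ≤ nj ∧ nj < N then
      if cellD arr nj ni = 0 then z + 1 else z
    else z) 0

-- phase 1: zArr collects (i, j, zNum) for every iceberg cell
def zArrA (N M : Int) (arr : List (List Int)) : List (Int × Int × Int) :=
  (PySem.List.pyRange 0 N).foldl (fun acc j =>
    (PySem.List.pyRange 0 M).foldl (fun acc i =>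
      if cellD arr j i > 0 then acc ++ [(i, j, zNumA N M arr j i)] else acc) acc) []

-- phase 2 loop body: arr[j][i] = max(0, arr[j][i] - zNum); if arr[j][i] == 0: flag = 1
def meltStepA (st : List (List Int) × Int) (t : Int × Int × Int) : List (List Int) × Int :=
  let a := setCell st.1 t.2.1 t.1 (max 0 (cellD st.1 t.2.1 t.1 - t.2.2))
  (a, if cellD a t.2.1 t.1 = 0 then 1 else st.2)

def bfs (N : Int) (M : Int) (arr : List (List Int)) : Int :=
  ((zArrA N M arr).foldl meltStepA (arr, 0)).2

-- ===== PORT B =====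
-- delta[nj][ni] += 1
def incrB (d : List (List Int)) (p : Int × Int) : List (List Int) :=
  setCell d p.1 p.2 (cellD d p.1 p.2 + 1)

-- the inner 'for nj, ni in (...)' loop of the scatter pass for a sea cell (j, i)
def scatterCellB (N M : Int) (arr : List (List Int)) (d : List (List Int)) (j i : Int) :
    List (List Int) :=
  [(j - 1, i), (j + 1, i), (j, i - 1), (j, i + 1)].foldl (fun d p =>
    if 0 ≤ p.1 ∧ p.1 < N ∧ 0 ≤ p.2 ∧ p.2 < M ∧ cellD arr p.1 p.2 > 0 then incrB d p else d) d

-- delta = [[0]*M for _ in range(N)]; the scatter double loop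
-- (List.replicate M.toNat 0 is exact for Python's [0]*M: a non-positive M gives [])
def buildDeltaB (N M : Int) (arr : List (List Int)) : List (List Int) :=
  (PySem.List.pyRange 0 N).foldl (fun d j =>
    (PySem.List.pyRange 0 M).foldl (fun d i =>
      if cellD arr j i = 0 then scatterCellB N M arr d j i else d) d)
    ((PySem.List.pyRange 0 N).map (fun _ => List.replicate M.toNat 0))

-- second pass body: if arr[j][i] > 0: arr[j][i] = max(0, arr[j][i] - delta[j][i]); flag on zero
def applyCellB (delta : List (List Int)) (st : List (List Int) × Int) (j i : Int) :
    List (List Int) × Int :=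
  if cellD st.1 j i > 0 then
    let a := setCell st.1 j i (max 0 (cellD st.1 j i - cellD delta j i))
    (a, if cellD a j i = 0 then 1 else st.2)
  else st

def bfs_alt (N : Int) (M : Int) (arr : List (List Int)) : Int :=
  let delta := buildDeltaB N M arr
  ((PySem.List.pyRange 0 N).foldl (fun st j =>
    (PySem.List.pyRange 0 M).foldl (fun st i => applyCellB delta st j i) st) (arr, 0)).2

-- ===== PRECONDITION & SPEC =====
-- exactly the inputs where the Python A returns (no IndexError): when both loops actually run,
-- every visited row must exist and be at least M long
def Pre_bfs (N : Int) (M : Int) (arr : List (List Int)) : Prop :=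
  0 < M → 0 < N → N ≤ (arr.length : Int) ∧ ∀ row ∈ arr.take N.toNat, M ≤ (row.length : Int)
instance (N : Int) (M : Int) (arr : List (List Int)) : Decidable (Pre_bfs N M arr) := by
  unfold Pre_bfs; infer_instance

def pvWitness_bfs : Int × Int × List (List Int) := (2, 2, [[1, 0], [2, 3]])

def Spec_bfs (N : Int) (M : Int) (arr : List (List Int)) (out : Int) : Prop := out = bfs_alt N M arr
instance (N : Int) (M : Int) (arr : List (List Int)) (out : Int) : Decidable (Spec_bfs N M arr out) := by unfold Spec_bfs; infer_instance

-- ===== CLAIM (what is proved, stated in full; the proofs are below) =====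
def Claim_equal_bfs : Prop := ∀ (N : Int) (M : Int) (arr : List (List Int)), Dom_bfs N M arr → Pre_bfs N M arr → Spec_bfs N M arr (bfs N M arr)

-- ===== LEMMAS AND PROOFS =====

-- 0/1 indicator of an in-bounds sea cell: the value both zNum and the scatter count reduce to
def seaB (N M : Int) (old : List (List Int)) (j i : Int) : Int :=
  if 0 ≤ j ∧ j < N ∧ 0 ≤ i ∧ i < M ∧ cellD old j i = 0 then 1 else 0

-- a positive cellD read can only come from a structurally present cell
theorem cellD_pos_bounds (a : List (List Int)) (j i : Int) (hj : 0 ≤ j) (hi : 0 ≤ i)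
    (hpos : 0 < cellD a j i) :
    j.toNat < a.length ∧ i.toNat < (a.getD j.toNat []).length := by
  unfold cellD at hpos
  rw [PySem.List.pyGetD_of_nonneg _ _ hj, PySem.List.pyGetD_of_nonneg _ _ hi] at hpos
  by_cases h1 : j.toNat < a.length
  · refine ⟨h1, ?_⟩
    by_contra h2
    rw [List.getD_eq_default _ _ (by omega)] at hpos
    exact absurd hpos (by norm_num)
  · rw [show a.getD j.toNat [] = [] from List.getD_eq_default _ _ (by omega)] at hpos
    simp [List.getD] at hpos

theorem cellD_nonneg_eq (a : List (List Int)) (j i : Int) (hj : 0 ≤ j) (hi : 0 ≤ i) :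
    cellD a j i = (a.getD j.toNat []).getD i.toNat 0 := by
  unfold cellD
  rw [PySem.List.pyGetD_of_nonneg _ _ hj, PySem.List.pyGetD_of_nonneg _ _ hi]

theorem length_setCell (a : List (List Int)) (j i v : Int) :
    (setCell a j i v).length = a.length := by
  simp [setCell]

theorem getD_setCell (a : List (List Int)) (j i v : Int) (k : Nat) :
    (setCell a j i v).getD k [] =
      if k = j.toNat ∧ j.toNat < a.length then (a.getD j.toNat []).set i.toNat v
      else a.getD k [] := by
  unfold setCell
  split_ifs with h
  · obtain ⟨rfl, hlt⟩ := h
    simp [List.getD, hlt]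
  · rcases Decidable.em (k = j.toNat) with rfl | hne
    · have : ¬ j.toNat < a.length := by tauto
      rw [List.set_eq_of_length_le (by omega)]
    · simp only [List.getD]
      rw [List.getElem?_set_ne (fun h => hne h.symm)]

theorem rowlen_setCell (a : List (List Int)) (j i v : Int) (k : Nat) :
    ((setCell a j i v).getD k []).length = (a.getD k []).length := by
  rw [getD_setCell]
  split_ifs with h
  · obtain ⟨rfl, _⟩ := h; simp
  · rfl

theorem cellD_setCell_same (a : List (List Int)) (j i v : Int) (hj : 0 ≤ j) (hi : 0 ≤ i)
    (hjl : j.toNat < a.length) (hil : i.toNat < (a.getD j.toNat []).length) :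
    cellD (setCell a j i v) j i = v := by
  rw [cellD_nonneg_eq _ _ _ hj hi, getD_setCell, if_pos ⟨rfl, hjl⟩]
  rw [List.getD, List.getElem?_set_self', List.getElem?_eq_getElem hil]
  rfl

theorem cellD_setCell_ne (a : List (List Int)) (j i v j' i' : Int) (hj : 0 ≤ j) (hi : 0 ≤ i)
    (hj' : 0 ≤ j') (hi' : 0 ≤ i') (hne : (j, i) ≠ (j', i')) :
    cellD (setCell a j i v) j' i' = cellD a j' i' := by
  rw [cellD_nonneg_eq _ _ _ hj' hi', cellD_nonneg_eq _ _ _ hj' hi', getD_setCell]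
  split_ifs with h
  · obtain ⟨hk, hlt⟩ := h
    have hjj : j' = j := by omega
    have hii : i' ≠ i := by
      intro hii
      exact hne (by rw [hii, hjj])
    have hnat : i.toNat ≠ i'.toNat := by omega
    rw [hk]
    simp [List.getD, List.getElem?_set_ne hnat]
  · rfl

-- ---------- A-side characterisation: flag = any iceberg cell melts to 0 ----------

-- A's direction-vector loop is the sum of the four sea indicators
theorem ind_eq (N M : Int) (old : List (List Int)) (ni nj z : Int) :
    (if 0 ≤ ni ∧ ni < M ∧ 0 ≤ nj ∧ nj < N then
      if cellD old nj ni = 0 then z + 1 else z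
    else z) = z + seaB N M old nj ni := by
  unfold seaB; split_ifs <;> omega

theorem zNumA_eq (N M : Int) (arr : List (List Int)) (j i : Int) :
    zNumA N M arr j i = seaB N M arr (j - 1) i + seaB N M arr (j + 1) i +
      seaB N M arr j (i - 1) + seaB N M arr j (i + 1) := by
  have h4 : PySem.List.pyRange 0 4 = [0, 1, 2, 3] := by decide
  unfold zNumA
  rw [h4]
  simp only [List.foldl_cons, List.foldl_nil]
  have t2 : Int.toNat 2 = 2 := by decide
  have t3 : Int.toNat 3 = 3 := by decide
  norm_num [PySem.List.pyGetD, PySem.List.pyIdx?, t2, t3, ind_eq]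
  simp only [seaB, sub_eq_add_neg]
  split_ifs <;> omega

theorem zArrA_eq (N M : Int) (arr : List (List Int)) :
    zArrA N M arr = (PySem.List.pyRange 0 N).flatMap (fun j =>
      (((PySem.List.pyRange 0 M).filter (fun i => decide (cellD arr j i > 0))).map
        (fun i => (i, j, zNumA N M arr j i)))) := by
  unfold zArrA
  have hin : ∀ (j : Int) (acc : List (Int × Int × Int)),
      (PySem.List.pyRange 0 M).foldl (fun acc i =>
        if cellD arr j i > 0 then acc ++ [(i, j, zNumA N M arr j i)] else acc) acc
      = acc ++ (((PySem.List.pyRange 0 M).filter (fun i => decide (cellD arr j i > 0))).map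
        (fun i => (i, j, zNumA N M arr j i))) := by
    intro j acc
    have := PySem.List.foldl_append_if (fun i => decide (cellD arr j i > 0))
      (fun i => (i, j, zNumA N M arr j i)) (PySem.List.pyRange 0 M) acc
    simpa using this
  simp only [hin]
  simpa using PySem.List.foldl_append_eq_flatMap
    (fun j => (((PySem.List.pyRange 0 M).filter (fun i => decide (cellD arr j i > 0))).map
      (fun i => (i, j, zNumA N M arr j i)))) (PySem.List.pyRange 0 N) []

-- A's phase-2 fold: provided the pending cells are in bounds, pairwise distinct and still hold
-- their original values, the flag is 'any cell melts to 0'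
theorem meltFold_flag (arr0 : List (List Int)) :
    ∀ (l : List (Int × Int × Int)) (a : List (List Int)) (fl : Int),
    (∀ t ∈ l, 0 ≤ t.1 ∧ 0 ≤ t.2.1 ∧ t.2.1.toNat < a.length ∧
       t.1.toNat < (a.getD t.2.1.toNat []).length) →
    l.Pairwise (fun s t => (s.1, s.2.1) ≠ (t.1, t.2.1)) →
    (∀ t ∈ l, cellD a t.2.1 t.1 = cellD arr0 t.2.1 t.1) →
    (l.foldl meltStepA (a, fl)).2 =
      if l.any (fun t => decide (cellD arr0 t.2.1 t.1 ≤ t.2.2)) then 1 else fl := by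
  intro l
  induction l with
  | nil => intro a fl _ _ _; simp
  | cons t l' ih =>
    intro a fl hb hp hag
    obtain ⟨i, j, z⟩ := t
    obtain ⟨hi, hj, hjl, hil⟩ := hb _ (List.mem_cons_self)
    rw [List.foldl_cons]
    have hsame : cellD (setCell a j i (max 0 (cellD a j i - z))) j i
        = max 0 (cellD a j i - z) := cellD_setCell_same a j i _ hj hi hjl hil
    have hstep : meltStepA (a, fl) (i, j, z) =
        (setCell a j i (max 0 (cellD a j i - z)),
          if cellD arr0 j i ≤ z then 1 else fl) := by
      simp only [meltStepA, hsame]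
      have hc : cellD a j i = cellD arr0 j i := hag _ (List.mem_cons_self)
      congr 1
      rw [hc]
      split_ifs <;> omega
    rw [hstep]
    rw [ih _ _ ?hb' ?hp' ?hag']
    case hb' =>
      intro t' ht'
      obtain ⟨h1, h2, h3, h4⟩ := hb _ (List.mem_cons_of_mem _ ht')
      refine ⟨h1, h2, ?_, ?_⟩
      · rwa [length_setCell]
      · rwa [rowlen_setCell]
    case hp' => exact hp.of_cons
    case hag' =>
      intro t' ht'
      have hne : (i, j) ≠ (t'.1, t'.2.1) := (List.pairwise_cons.mp hp).1 _ ht'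
      obtain ⟨h1, h2, _, _⟩ := hb _ (List.mem_cons_of_mem _ ht')
      have hne' : (j, i) ≠ (t'.2.1, t'.1) := by
        simp only [ne_eq, Prod.mk.injEq, not_and] at hne ⊢
        intro hj' hi'
        exact hne hi' hj'
      rw [cellD_setCell_ne _ _ _ _ _ _ hj hi h2 h1 hne']
      exact hag _ (List.mem_cons_of_mem _ ht')
    simp only [List.any_cons]
    by_cases hc0 : cellD arr0 j i ≤ z <;>
      by_cases hrest : (l'.any fun t => decide (cellD arr0 t.2.1 t.1 ≤ t.2.2)) = true <;>
        simp [hc0, hrest]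

theorem zArrA_bounds (N M : Int) (arr : List (List Int)) :
    ∀ t ∈ zArrA N M arr, 0 ≤ t.1 ∧ 0 ≤ t.2.1 ∧ t.2.1.toNat < arr.length ∧
      t.1.toNat < (arr.getD t.2.1.toNat []).length := by
  intro t ht
  rw [zArrA_eq] at ht
  obtain ⟨j, hj, ht⟩ := List.mem_flatMap.mp ht
  obtain ⟨i, hi, rfl⟩ := List.mem_map.mp ht
  have hjr := PySem.List.mem_pyRange_one.mp hj
  have hir := PySem.List.mem_pyRange_one.mp (List.mem_of_mem_filter hi)
  have hpos : 0 < cellD arr j i := by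
    have := List.of_mem_filter hi
    simpa using this
  have := cellD_pos_bounds arr j i (by omega) (by omega) hpos
  dsimp only
  exact ⟨by omega, by omega, this.1, this.2⟩

theorem zArrA_pairwise (N M : Int) (arr : List (List Int)) :
    (zArrA N M arr).Pairwise (fun s t => (s.1, s.2.1) ≠ (t.1, t.2.1)) := by
  rw [zArrA_eq]
  rw [List.pairwise_flatMap]
  constructor
  · intro j _
    rw [List.pairwise_map]
    exact ((PySem.List.pairwise_lt_pyRange_one 0 M).filter _).imp (by
      intro a b hab
      simp only [ne_eq, Prod.mk.injEq, not_and]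
      intro h _; omega)
  · refine (PySem.List.pairwise_lt_pyRange_one 0 N).imp ?_
    intro j j' hjj x hx y hy
    obtain ⟨i, _, rfl⟩ := List.mem_map.mp hx
    obtain ⟨i', _, rfl⟩ := List.mem_map.mp hy
    simp only [ne_eq, Prod.mk.injEq, not_and]
    intro _ h; omega

-- the common normal form both returns reduce to
def anyMelt (N M : Int) (arr : List (List Int)) : Bool :=
  (PySem.List.pyRange 0 N).any (fun j => (PySem.List.pyRange 0 M).any (fun i =>
    decide (0 < cellD arr j i) && decide (cellD arr j i ≤ zNumA N M arr j i)))

theorem bfs_eq_anyMelt (N M : Int) (arr : List (List Int)) :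
    bfs N M arr = if anyMelt N M arr then 1 else 0 := by
  unfold bfs
  rw [meltFold_flag arr (zArrA N M arr) arr 0 (zArrA_bounds N M arr)
    (zArrA_pairwise N M arr) (fun _ _ => rfl)]
  congr 1
  rw [zArrA_eq]
  unfold anyMelt
  simp only [List.any_flatMap, List.any_map, List.any_filter]
  congr 1

-- ---------- B-side: the delta grid holds exactly the sea-neighbour counts ----------

-- the flat list of scatter targets, one entry per (sea cell, in-bounds iceberg neighbour) pair
def evListB (N M : Int) (arr : List (List Int)) : List (Int × Int) :=
  (PySem.List.pyRange 0 N).flatMap (fun j => (PySem.List.pyRange 0 M).flatMap (fun i =>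
    if cellD arr j i = 0 then
      [(j - 1, i), (j + 1, i), (j, i - 1), (j, i + 1)].filter (fun p =>
        decide (0 ≤ p.1 ∧ p.1 < N ∧ 0 ≤ p.2 ∧ p.2 < M ∧ cellD arr p.1 p.2 > 0))
    else []))

theorem foldl_filter {α β : Type} (p : β → Prop) [DecidablePred p] (f : α → β → α) :
    ∀ (l : List β) (a : α),
    l.foldl (fun a x => if p x then f a x else a) a
      = (l.filter (fun x => decide (p x))).foldl f a := by
  intro l
  induction l with
  | nil => intro a; rfl
  | cons x xs ih =>
    intro a
    by_cases hx : p x <;> simp [hx, ih]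

theorem buildDeltaB_eq (N M : Int) (arr : List (List Int)) :
    buildDeltaB N M arr = (evListB N M arr).foldl incrB
      ((PySem.List.pyRange 0 N).map (fun _ => List.replicate M.toNat 0)) := by
  unfold buildDeltaB evListB
  rw [List.foldl_flatMap]
  congr 1
  funext d j
  rw [List.foldl_flatMap]
  congr 1
  funext d i
  by_cases hs : cellD arr j i = 0
  · rw [if_pos hs, if_pos hs]
    simp only [scatterCellB]
    exact foldl_filter _ _ _ _
  · rw [if_neg hs, if_neg hs]
    rfl

-- the value of a cell after a fold of increments is its initial value plus its multiplicity
theorem cellD_foldl_incr (N M : Int) :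
    ∀ (l : List (Int × Int)) (d : List (List Int)),
    (∀ p ∈ l, 0 ≤ p.1 ∧ p.1 < N ∧ 0 ≤ p.2 ∧ p.2 < M) →
    d.length = N.toNat → (∀ k, k < N.toNat → (d.getD k []).length = M.toNat) →
    ∀ (tj ti : Int), 0 ≤ tj → tj < N → 0 ≤ ti → ti < M →
    cellD (l.foldl incrB d) tj ti = cellD d tj ti + l.count (tj, ti) := by
  intro l
  induction l with
  | nil => intro d _ _ _ tj ti _ _ _ _; simp
  | cons p rest ih =>
    intro d hb hlen hrow tj ti h1 h2 h3 h4
    obtain ⟨hp1, hp2, hp3, hp4⟩ := hb _ (List.mem_cons_self)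
    rw [List.foldl_cons]
    have hjl : p.1.toNat < d.length := by omega
    have hil : p.2.toNat < (d.getD p.1.toNat []).length := by
      rw [hrow _ (by omega)]; omega
    have hsame : cellD (incrB d p) p.1 p.2 = cellD d p.1 p.2 + 1 :=
      cellD_setCell_same d p.1 p.2 _ hp1 hp3 hjl hil
    rw [ih _ ?hb' ?hlen' ?hrow' tj ti h1 h2 h3 h4]
    case hb' => exact fun q hq => hb _ (List.mem_cons_of_mem _ hq)
    case hlen' => rw [incrB, length_setCell]; exact hlen
    case hrow' =>
      intro k hk
      rw [incrB, rowlen_setCell]; exact hrow k hk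
    rw [List.count_cons]
    by_cases heq : p = (tj, ti)
    · subst heq
      simp only [hsame, beq_self_eq_true, if_true, Nat.cast_add, Nat.cast_one]
      omega
    · have hne : (p.1, p.2) ≠ (tj, ti) := by
        intro h
        exact heq (by cases p; simpa using h)
      rw [incrB, cellD_setCell_ne _ _ _ _ _ _ hp1 hp3 h1 h3 hne]
      simp [beq_iff_eq]
      exact heq

theorem count_flatMap {α β : Type} [BEq β] (a : β) (f : α → List β) :
    ∀ (l : List α), (l.flatMap f).count a = (l.map (fun x => (f x).count a)).sum := by
  intro l
  induction l with
  | nil => rfl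
  | cons x xs ih => simp [List.count_append, ih]

-- an indicator sum over a Nodup list picks out the single member
theorem sum_if_mem (l : List Int) (hnd : l.Nodup) (a : Int) (f : Int → Int) :
    (l.map (fun x => if x = a then f x else 0)).sum = if a ∈ l then f a else 0 := by
  induction l with
  | nil => simp
  | cons x xs ih =>
    simp only [List.map_cons, List.sum_cons, List.mem_cons]
    rcases List.nodup_cons.mp hnd with ⟨hx, hnd'⟩
    by_cases hxa : x = a
    · subst hxa
      rw [ih hnd']
      simp [hx]
    · rw [ih hnd']
      by_cases ha : a ∈ xs <;> simp [hxa, ha, Ne.symm hxa]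

-- double indicator sum over the two ranges
theorem sum2_ind (N M a b : Int) (f : Int → Int → Int) :
    ((PySem.List.pyRange 0 N).map (fun j => ((PySem.List.pyRange 0 M).map (fun i =>
      if j = a ∧ i = b then f j i else 0)).sum)).sum =
    if 0 ≤ a ∧ a < N ∧ 0 ≤ b ∧ b < M then f a b else 0 := by
  have hndN : (PySem.List.pyRange 0 N).Nodup := (PySem.List.pairwise_lt_pyRange_one 0 N).imp ne_of_lt
  have hndM : (PySem.List.pyRange 0 M).Nodup := (PySem.List.pairwise_lt_pyRange_one 0 M).imp ne_of_lt
  have hinner : ∀ j : Int, ((PySem.List.pyRange 0 M).map (fun i =>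
      if j = a ∧ i = b then f j i else 0)).sum =
      if j = a then (if b ∈ PySem.List.pyRange 0 M then f j b else 0) else 0 := by
    intro j
    by_cases hja : j = a
    · subst hja
      rw [← sum_if_mem _ hndM b (f j)]
      simp
    · simp only [hja, if_false]
      rw [List.sum_eq_zero]
      intro x hx
      obtain ⟨i, _, rfl⟩ := List.mem_map.mp hx
      exact if_neg (fun h => h.1)
  simp only [hinner]
  rw [sum_if_mem _ hndN a _]
  simp only [PySem.List.mem_pyRange_one]
  split_ifs <;> first | rfl | omega

-- casting a Nat-valued mapped sum to Int
theorem sum_count_cast {α : Type} (g : α → Nat) (l : List α) :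
    (((l.map g).sum : Nat) : Int) = (l.map (fun x => ((g x : Nat) : Int))).sum := by
  induction l with
  | nil => simp
  | cons x xs ih => simp [ih]

-- peeling one literal entry off a filtered count
theorem count_filter_literal (p : Int × Int → Prop) [DecidablePred p] (a x : Int × Int)
    (l : List (Int × Int)) :
    ((x :: l).filter (fun y => decide (p y))).count a
      = (if x = a ∧ p x then 1 else 0) + (l.filter (fun y => decide (p y))).count a := by
  by_cases hp : p x
  · rw [List.filter_cons_of_pos (by simpa using hp), List.count_cons]
    by_cases hxa : x = a
    · subst hxa
      simp [hp, Nat.add_comm]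
    · simp [hxa]
  · rw [List.filter_cons_of_neg (by simpa using hp)]
    simp [hp]

-- one scatter target: it contributes 1 exactly when it is the queried iceberg cell
theorem scatter_term (N M : Int) (arr : List (List Int)) (tj ti j i x y : Int)
    (h1 : 0 ≤ tj) (h2 : tj < N) (h3 : 0 ≤ ti) (h4 : ti < M)
    (hpos : 0 < cellD arr tj ti) (hs : cellD arr j i = 0)
    (hjb : 0 ≤ j ∧ j < N ∧ 0 ≤ i ∧ i < M) :
    (if (x, y) = ((tj, ti) : Int × Int) ∧ (0 ≤ x ∧ x < N ∧ 0 ≤ y ∧ y < M ∧ cellD arr x y > 0)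
      then (1 : Int) else 0)
      = if x = tj ∧ y = ti then seaB N M arr j i else 0 := by
  by_cases hc : x = tj ∧ y = ti
  · obtain ⟨rfl, rfl⟩ := hc
    rw [if_pos ⟨rfl, h1, h2, h3, h4, hpos⟩, if_pos ⟨rfl, rfl⟩]
    unfold seaB
    rw [if_pos ⟨hjb.1, hjb.2.1, hjb.2.2.1, hjb.2.2.2, hs⟩]
  · rw [if_neg, if_neg hc]
    rintro ⟨hpair, -⟩
    injection hpair with hx hy
    exact hc ⟨hx, hy⟩

-- multiplicity of an iceberg cell in the scatter-event list = its sea-neighbour count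
theorem count_evListB (N M : Int) (arr : List (List Int)) (tj ti : Int)
    (h1 : 0 ≤ tj) (h2 : tj < N) (h3 : 0 ≤ ti) (h4 : ti < M)
    (hpos : 0 < cellD arr tj ti) :
    ((evListB N M arr).count (tj, ti) : Int) = zNumA N M arr tj ti := by
  unfold evListB
  rw [count_flatMap, sum_count_cast]
  have hinner : ∀ j ∈ PySem.List.pyRange 0 N,
      ((((PySem.List.pyRange 0 M).flatMap (fun i =>
        if cellD arr j i = 0 then
          [(j - 1, i), (j + 1, i), (j, i - 1), (j, i + 1)].filter (fun p =>
            decide (0 ≤ p.1 ∧ p.1 < N ∧ 0 ≤ p.2 ∧ p.2 < M ∧ cellD arr p.1 p.2 > 0))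
        else [])).count (tj, ti) : Nat) : Int)
      = ((PySem.List.pyRange 0 M).map (fun i =>
          (if j = tj + 1 ∧ i = ti then seaB N M arr j i else 0) +
          (if j = tj - 1 ∧ i = ti then seaB N M arr j i else 0) +
          (if j = tj ∧ i = ti + 1 then seaB N M arr j i else 0) +
          (if j = tj ∧ i = ti - 1 then seaB N M arr j i else 0))).sum := by
    intro j hj
    rw [count_flatMap, sum_count_cast]
    refine congrArg List.sum (List.map_congr_left ?_)
    intro i hi
    have hjr := PySem.List.mem_pyRange_one.mp hj
    have hir := PySem.List.mem_pyRange_one.mp hi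
    by_cases hs : cellD arr j i = 0
    · rw [if_pos hs]
      rw [count_filter_literal, count_filter_literal, count_filter_literal, count_filter_literal]
      simp only [List.filter_nil, List.count_nil, Nat.add_zero]
      push_cast
      have hjb : 0 ≤ j ∧ j < N ∧ 0 ≤ i ∧ i < M := ⟨by omega, by omega, by omega, by omega⟩
      rw [scatter_term N M arr tj ti j i (j - 1) i h1 h2 h3 h4 hpos hs hjb,
        scatter_term N M arr tj ti j i (j + 1) i h1 h2 h3 h4 hpos hs hjb,
        scatter_term N M arr tj ti j i j (i - 1) h1 h2 h3 h4 hpos hs hjb,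
        scatter_term N M arr tj ti j i j (i + 1) h1 h2 h3 h4 hpos hs hjb]
      have c1 : (if j - 1 = tj ∧ i = ti then seaB N M arr j i else 0)
          = (if j = tj + 1 ∧ i = ti then seaB N M arr j i else 0) :=
        if_congr ⟨fun ⟨u, v⟩ => ⟨by omega, v⟩, fun ⟨u, v⟩ => ⟨by omega, v⟩⟩ rfl rfl
      have c2 : (if j + 1 = tj ∧ i = ti then seaB N M arr j i else 0)
          = (if j = tj - 1 ∧ i = ti then seaB N M arr j i else 0) :=
        if_congr ⟨fun ⟨u, v⟩ => ⟨by omega, v⟩, fun ⟨u, v⟩ => ⟨by omega, v⟩⟩ rfl rfl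
      have c3' : (if j = tj ∧ i - 1 = ti then seaB N M arr j i else 0)
          = (if j = tj ∧ i = ti + 1 then seaB N M arr j i else 0) :=
        if_congr ⟨fun ⟨u, v⟩ => ⟨u, by omega⟩, fun ⟨u, v⟩ => ⟨u, by omega⟩⟩ rfl rfl
      have c4' : (if j = tj ∧ i + 1 = ti then seaB N M arr j i else 0)
          = (if j = tj ∧ i = ti - 1 then seaB N M arr j i else 0) :=
        if_congr ⟨fun ⟨u, v⟩ => ⟨u, by omega⟩, fun ⟨u, v⟩ => ⟨u, by omega⟩⟩ rfl rfl
      rw [c1, c2, c3', c4']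
      ring
    · rw [if_neg hs]
      simp only [List.count_nil, Nat.cast_zero]
      have hz : seaB N M arr j i = 0 := by simp [seaB, hs]
      rw [hz]
      simp
  rw [List.map_congr_left hinner]
  simp only [List.sum_map_add]
  rw [sum2_ind, sum2_ind, sum2_ind, sum2_ind]
  rw [zNumA_eq]
  simp only [seaB]
  split_ifs <;> omega

-- the delta grid of an in-bounds iceberg cell equals A's zNum there
theorem buildDeltaB_val (N M : Int) (arr : List (List Int)) (tj ti : Int)
    (h1 : 0 ≤ tj) (h2 : tj < N) (h3 : 0 ≤ ti) (h4 : ti < M)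
    (hpos : 0 < cellD arr tj ti) :
    cellD (buildDeltaB N M arr) tj ti = zNumA N M arr tj ti := by
  rw [buildDeltaB_eq]
  have hb : ∀ p ∈ evListB N M arr, 0 ≤ p.1 ∧ p.1 < N ∧ 0 ≤ p.2 ∧ p.2 < M := by
    intro p hp
    unfold evListB at hp
    obtain ⟨j, _, hp⟩ := List.mem_flatMap.mp hp
    obtain ⟨i, _, hp⟩ := List.mem_flatMap.mp hp
    split at hp
    · have := List.of_mem_filter hp
      simp only [decide_eq_true_eq] at this
      exact ⟨this.1, this.2.1, this.2.2.1, this.2.2.2.1⟩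
    · simp at hp
  have hlen : ((PySem.List.pyRange 0 N).map (fun _ => List.replicate M.toNat (0 : Int))).length
      = N.toNat := by
    rw [List.length_map, PySem.List.length_pyRange_one]
    omega
  have hrow : ∀ k, k < N.toNat →
      (((PySem.List.pyRange 0 N).map (fun _ => List.replicate M.toNat (0 : Int))).getD k []).length
        = M.toNat := by
    intro k hk
    rw [List.getD, List.getElem?_eq_getElem (by rw [hlen]; exact hk)]
    simp
  rw [cellD_foldl_incr N M _ _ hb hlen hrow tj ti h1 h2 h3 h4]
  have hzero : cellD ((PySem.List.pyRange 0 N).map (fun _ => List.replicate M.toNat (0 : Int))) tj ti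
      = 0 := by
    rw [cellD_nonneg_eq _ _ _ h1 h3]
    have hlt : tj.toNat <
        ((PySem.List.pyRange 0 N).map (fun _ => List.replicate M.toNat (0 : Int))).length := by
      rw [hlen]; omega
    rw [List.getD_eq_getElem _ _ hlt]
    simp [List.getD]
  rw [hzero, zero_add]
  exact count_evListB N M arr tj ti h1 h2 h3 h4 hpos

-- ---------- B-side pass 2: the flag ----------

-- the row-major list of visited cells
def pairsJI (N M : Int) : List (Int × Int) :=
  (PySem.List.pyRange 0 N).flatMap (fun j => (PySem.List.pyRange 0 M).map (fun i => (j, i)))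

theorem bfs_alt_pairs (N M : Int) (arr : List (List Int)) :
    bfs_alt N M arr =
      ((pairsJI N M).foldl (fun st p => applyCellB (buildDeltaB N M arr) st p.1 p.2) (arr, 0)).2 := by
  unfold bfs_alt pairsJI
  rw [List.foldl_flatMap]
  show (List.foldl (fun st j => List.foldl (fun st i => applyCellB (buildDeltaB N M arr) st j i) st
    (PySem.List.pyRange 0 M)) (arr, 0) (PySem.List.pyRange 0 N)).2 = _
  have hF : (fun (st : List (List Int) × Int) (j : Int) =>
      List.foldl (fun st i => applyCellB (buildDeltaB N M arr) st j i) st (PySem.List.pyRange 0 M))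
      = (fun (acc : List (List Int) × Int) (x : Int) =>
        List.foldl (fun st p => applyCellB (buildDeltaB N M arr) st p.1 p.2) acc
          ((PySem.List.pyRange 0 M).map (fun i => (x, i)))) := by
    funext st j
    rw [List.foldl_map]
  rw [hF]

-- B's pass-2 fold: on pairwise-distinct nonneg cells still holding their original values,
-- the flag is 'any original iceberg cell with value ≤ its delta'
theorem applyFold_flag (delta arr0 : List (List Int)) :
    ∀ (l : List (Int × Int)) (a : List (List Int)) (fl : Int),
    (∀ p ∈ l, 0 ≤ p.1 ∧ 0 ≤ p.2) →
    l.Pairwise (· ≠ ·) →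
    (∀ p ∈ l, cellD a p.1 p.2 = cellD arr0 p.1 p.2) →
    (l.foldl (fun st p => applyCellB delta st p.1 p.2) (a, fl)).2 =
      if l.any (fun p => decide (0 < cellD arr0 p.1 p.2) &&
          decide (cellD arr0 p.1 p.2 ≤ cellD delta p.1 p.2)) then 1 else fl := by
  intro l
  induction l with
  | nil => intro a fl _ _ _; simp
  | cons p rest ih =>
    intro a fl hb hp hag
    obtain ⟨j, i⟩ := p
    obtain ⟨hj, hi⟩ := hb _ (List.mem_cons_self)
    have horig : cellD a j i = cellD arr0 j i := hag _ (List.mem_cons_self)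
    rw [List.foldl_cons]
    by_cases hpos : 0 < cellD a j i
    · -- iceberg cell: it is structurally present, gets written, may flag
      obtain ⟨hjl, hil⟩ := cellD_pos_bounds a j i hj hi hpos
      have hsame : cellD (setCell a j i (max 0 (cellD a j i - cellD delta j i))) j i
          = max 0 (cellD a j i - cellD delta j i) := cellD_setCell_same a j i _ hj hi hjl hil
      have hstep : applyCellB delta (a, fl) j i =
          (setCell a j i (max 0 (cellD a j i - cellD delta j i)),
            if cellD arr0 j i ≤ cellD delta j i then 1 else fl) := by
        simp only [applyCellB, if_pos hpos, hsame]
        congr 1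
        rw [horig] at *
        split_ifs <;> omega
      rw [hstep]
      rw [ih _ _ ?hb' ?hp' ?hag']
      case hb' => exact fun q hq => hb _ (List.mem_cons_of_mem _ hq)
      case hp' => exact hp.of_cons
      case hag' =>
        intro q hq
        have hne : (j, i) ≠ q := (List.pairwise_cons.mp hp).1 _ hq
        obtain ⟨hq1, hq2⟩ := hb _ (List.mem_cons_of_mem _ hq)
        have hne' : (j, i) ≠ (q.1, q.2) := by
          cases q; exact hne
        rw [cellD_setCell_ne _ _ _ _ _ _ hj hi hq1 hq2 hne']
        exact hag _ (List.mem_cons_of_mem _ hq)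
      simp only [List.any_cons]
      rw [horig] at hpos
      by_cases hc0 : cellD arr0 j i ≤ cellD delta j i <;>
        by_cases hrest : (rest.any fun p => decide (0 < cellD arr0 p.1 p.2) &&
            decide (cellD arr0 p.1 p.2 ≤ cellD delta p.1 p.2)) = true <;>
          simp [hc0, hrest, hpos]
    · -- sea / absent cell: no write, no flag
      have hstep : applyCellB delta (a, fl) j i = (a, fl) := by
        simp only [applyCellB, if_neg hpos]
      rw [hstep]
      rw [ih _ _ (fun q hq => hb _ (List.mem_cons_of_mem _ hq)) hp.of_cons
        (fun q hq => hag _ (List.mem_cons_of_mem _ hq))]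
      have hposF : ¬ 0 < cellD arr0 j i := by rw [← horig]; exact hpos
      have hd : decide (0 < cellD arr0 j i) = false := by simpa using hposF
      have hsplit : (((j, i) :: rest).any fun p => decide (0 < cellD arr0 p.1 p.2) &&
            decide (cellD arr0 p.1 p.2 ≤ cellD delta p.1 p.2))
          = (rest.any fun p => decide (0 < cellD arr0 p.1 p.2) &&
            decide (cellD arr0 p.1 p.2 ≤ cellD delta p.1 p.2)) := by
        rw [List.any_cons]
        simp [hd]
      rw [hsplit]

theorem pairsJI_nonneg (N M : Int) : ∀ p ∈ pairsJI N M, 0 ≤ p.1 ∧ 0 ≤ p.2 := by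
  intro p hp
  unfold pairsJI at hp
  obtain ⟨j, hj, hp⟩ := List.mem_flatMap.mp hp
  obtain ⟨i, hi, rfl⟩ := List.mem_map.mp hp
  have := PySem.List.mem_pyRange_one.mp hj
  have := PySem.List.mem_pyRange_one.mp hi
  exact ⟨by omega, by omega⟩

theorem pairsJI_pairwise (N M : Int) : (pairsJI N M).Pairwise (· ≠ ·) := by
  unfold pairsJI
  rw [List.pairwise_flatMap]
  constructor
  · intro j _
    rw [List.pairwise_map]
    exact (PySem.List.pairwise_lt_pyRange_one 0 M).imp (by
      intro a b hab
      simp only [ne_eq, Prod.mk.injEq, not_and]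
      intro _ h; omega)
  · refine (PySem.List.pairwise_lt_pyRange_one 0 N).imp ?_
    intro j j' hjj x hx y hy
    obtain ⟨i, _, rfl⟩ := List.mem_map.mp hx
    obtain ⟨i', _, rfl⟩ := List.mem_map.mp hy
    simp only [ne_eq, Prod.mk.injEq, not_and]
    intro h; omega

theorem bfs_alt_eq_anyMelt (N M : Int) (arr : List (List Int)) :
    bfs_alt N M arr = if anyMelt N M arr then 1 else 0 := by
  rw [bfs_alt_pairs]
  rw [applyFold_flag (buildDeltaB N M arr) arr (pairsJI N M) arr 0
    (pairsJI_nonneg N M) (pairsJI_pairwise N M) (fun _ _ => rfl)]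
  refine congrArg (fun b : Bool => if b then (1 : Int) else 0) ?_
  unfold pairsJI anyMelt
  simp only [List.any_flatMap, List.any_map]
  apply PySem.List.any_congr_mem
  intro j hj
  apply PySem.List.any_congr_mem
  intro i hi
  dsimp only [Function.comp]
  have hjr := PySem.List.mem_pyRange_one.mp hj
  have hir := PySem.List.mem_pyRange_one.mp hi
  by_cases hpos : 0 < cellD arr j i
  · rw [buildDeltaB_val N M arr j i (by omega) (by omega) (by omega) (by omega) hpos]
  · simp [hpos]

-- ===== VERDICT (by name: the statement is the Claim_ definition above) =====
theorem bfs_spec : Claim_equal_bfs := by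
  intro N M arr _ _
  unfold Spec_bfs
  rw [bfs_eq_anyMelt, bfs_alt_eq_anyMelt]
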